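-- pv_equiv track=rewrite | github.com/razon1494/sql-query-feedback-system | backend/sql_parser.py | _parse_select_cols
-- ===== SOURCE A (Python) =====
-- from typing import Optional, List, Dict, Any
--
-- def _parse_select_cols(select_str: str) -> List[str]:
--     """Parse SELECT column list handling function calls."""
--     if not select_str:
--         return []
--     cols = []
--     depth = 0
--     current = ''
--     for ch in select_str:
--         if ch == '(':
--             depth += 1
--             current += ch
--         elif ch == ')':
--             depth -= 1
--             current += ch
--         elif ch == ',' and depth == 0:
--             cols.append(current.strip())
--             current = ''
--         else:
--             current += ch
--     if current.strip():
--         cols.append(current.strip())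
--     return cols
-- ===== SOURCE B (Python) =====
-- def _parse_select_cols(select_str):
--     """Split the column list at its top-level commas (found one at a time),
--     then strip the pieces, dropping a trailing empty piece."""
--     if not select_str:
--         return []
--     segs = []
--     s = select_str
--     while True:
--         depth = 0
--         cut = -1
--         for i, ch in enumerate(s):
--             if ch == '(':
--                 depth += 1
--             elif ch == ')':
--                 depth -= 1
--             elif ch == ',' and depth == 0:
--                 cut = i
--                 break
--         if cut == -1:
--             segs.append(s)
--             break
--         segs.append(s[:cut])
--         s = s[cut + 1:]
--     cols = [seg.strip() for seg in segs[:-1]]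
--     last = segs[-1].strip()
--     if last:
--         cols.append(last)
--     return cols
-- ===== Notes on version B (the rewrite author's own statement) =====
-- stated objective: alternative
-- what changed: B repeatedly locates the first top-level comma and cuts the string there, collecting raw segments, then strips them in a post-pass that drops only a trailing empty segment, instead of A's single fold that interleaves depth tracking, character accumulation and stripping.
import Mathlib
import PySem

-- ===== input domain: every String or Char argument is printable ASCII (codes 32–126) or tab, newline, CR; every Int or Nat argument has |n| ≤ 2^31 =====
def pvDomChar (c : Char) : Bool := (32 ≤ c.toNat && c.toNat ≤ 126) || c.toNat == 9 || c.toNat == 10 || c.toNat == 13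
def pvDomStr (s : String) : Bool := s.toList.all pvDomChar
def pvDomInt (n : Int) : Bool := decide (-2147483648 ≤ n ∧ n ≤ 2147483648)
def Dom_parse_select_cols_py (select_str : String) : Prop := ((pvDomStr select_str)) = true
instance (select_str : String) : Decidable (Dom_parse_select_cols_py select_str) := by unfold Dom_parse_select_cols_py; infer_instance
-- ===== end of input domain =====

-- B cuts the string at top-level commas one at a time and strips in a post-pass; same values as A, no speed claim.

-- ===== PORT A =====
-- A's loop state: (cols, depth, current), over List Char; strings are rebuilt at the end.
def pvAstep (st : List (List Char) × Int × List Char) (ch : Char) : List (List Char) × Int × List Char :=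
  if ch = '(' then (st.1, st.2.1 + 1, st.2.2 ++ [ch])
  else if ch = ')' then (st.1, st.2.1 - 1, st.2.2 ++ [ch])
  else if ch = ',' ∧ st.2.1 = 0 then (st.1 ++ [PySem.Chars.strip st.2.2], st.2.1, [])
  else (st.1, st.2.1, st.2.2 ++ [ch])

-- the `if current.strip():` finalization
def pvAfin (st : List (List Char) × Int × List Char) : List (List Char) :=
  if PySem.Chars.strip st.2.2 ≠ [] then st.1 ++ [PySem.Chars.strip st.2.2] else st.1

def parse_select_cols_py (select_str : String) : List String :=
  if select_str = "" then []
  else (pvAfin (select_str.toList.foldl pvAstep ([], 0, []))).map String.ofList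

-- ===== PORT B =====
-- index of the first depth-0 comma (B's inner `for i, ch in enumerate(s)` scan)
def pvFindTop : Int → List Char → Option Nat
  | _, [] => none
  | d, c :: rest =>
    if c = '(' then (pvFindTop (d + 1) rest).map (· + 1)
    else if c = ')' then (pvFindTop (d - 1) rest).map (· + 1)
    else if c = ',' ∧ d = 0 then some 0
    else (pvFindTop d rest).map (· + 1)

-- B's outer `while` loop: collect the raw segments (fuel is only a structural
-- totality guard: each cut strictly shortens the string, so |cs|+1 always suffices)
def pvSegsF : Nat → List Char → List (List Char)
  | 0, _ => []
  | fuel + 1, cs =>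
    match pvFindTop 0 cs with
    | none => [cs]
    | some j => cs.take j :: pvSegsF fuel (cs.drop (j + 1))

def pvSegs (cs : List Char) : List (List Char) := pvSegsF (cs.length + 1) cs

-- B's post-pass: strip segs[:-1], append stripped last segment if nonempty
def pvBfin (segs : List (List Char)) : List (List Char) :=
  let cols := segs.dropLast.map PySem.Chars.strip
  let last := PySem.Chars.strip (segs.getLastD [])
  if last ≠ [] then cols ++ [last] else cols

def parse_select_cols_py_alt (select_str : String) : List String :=
  if select_str = "" then []
  else (pvBfin (pvSegs select_str.toList)).map String.ofList

-- ===== PRECONDITION & SPEC =====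
def Spec_parse_select_cols_py (select_str : String) (out : List String) : Prop := out = parse_select_cols_py_alt select_str
instance (select_str : String) (out : List String) : Decidable (Spec_parse_select_cols_py select_str out) := by unfold Spec_parse_select_cols_py; infer_instance

-- ===== CLAIM (what is proved, stated in full; the proofs are below) =====
def Claim_equal_parse_select_cols_py : Prop := ∀ (select_str : String), Dom_parse_select_cols_py select_str → Spec_parse_select_cols_py select_str (parse_select_cols_py select_str)

-- ===== LEMMAS AND PROOFS =====

theorem pvFindTop_lt {d : Int} {cs : List Char} {j : Nat} (h : pvFindTop d cs = some j) :
    j < cs.length := by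
  induction cs generalizing d j with
  | nil => simp [pvFindTop] at h
  | cons c rest ih =>
    unfold pvFindTop at h
    split_ifs at h with h1 h2 h3 <;>
      first
      | (obtain ⟨j', hj', rfl⟩ := Option.map_eq_some_iff.mp h
         have := ih hj'; simp; omega)
      | (cases h; simp)


-- A's fold from any state, read through pvAfin, restarts cleanly after the first depth-d top comma.
theorem pvA_split (cs : List Char) : ∀ (d : Int) (cur : List Char) (cols : List (List Char)),
    pvAfin (cs.foldl pvAstep (cols, d, cur)) =
      match pvFindTop d cs with
      | none => pvAfin (cols, 0, cur ++ cs)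
      | some j =>
          pvAfin ((cs.drop (j + 1)).foldl pvAstep
            (cols ++ [PySem.Chars.strip (cur ++ cs.take j)], 0, [])) := by
  induction cs with
  | nil => intro d cur cols; simp [pvFindTop, pvAfin]
  | cons c rest ih =>
    intro d cur cols
    unfold pvFindTop
    by_cases h1 : c = '('
    · simp only [List.foldl_cons, pvAstep, h1, if_pos rfl, ih]
      cases hf : pvFindTop (d + 1) rest <;>
        simp [hf, List.append_assoc]
    · by_cases h2 : c = ')'
      · simp only [List.foldl_cons, pvAstep, h1, h2, if_neg, if_pos rfl, ih]
        cases hf : pvFindTop (d - 1) rest <;>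
          simp [hf, h1, List.append_assoc]
      · by_cases h3 : c = ',' ∧ d = 0
        · simp [List.foldl_cons, pvAstep, h1, h2, h3]
        · simp only [List.foldl_cons, pvAstep, h1, h2, h3, if_neg, if_false, ih]
          cases hf : pvFindTop d rest <;>
            simp [hf, h1, h2, h3, List.append_assoc]

theorem pvSegs_ne_nil (cs : List Char) : pvSegs cs ≠ [] := by
  unfold pvSegs pvSegsF
  split <;> simp

theorem pvBfin_cons {rest : List (List Char)} (a : List Char) (h : rest ≠ []) :
    pvBfin (a :: rest) = PySem.Chars.strip a :: pvBfin rest := by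
  obtain ⟨b, t, rfl⟩ := List.exists_cons_of_ne_nil h
  unfold pvBfin
  simp only [List.dropLast_cons_of_ne_nil (List.cons_ne_nil b t), List.map_cons,
    List.getLastD_eq_getLast?, List.getLast?_cons_cons]
  split <;> simp

theorem pvSegsF_congr (f : Nat) : ∀ (g : Nat) (cs : List Char), cs.length < f → cs.length < g →
    pvSegsF f cs = pvSegsF g cs := by
  induction f with
  | zero => intro g cs hf _; omega
  | succ f ih =>
    intro g cs hf hg
    cases g with
    | zero => omega
    | succ g =>
      simp only [pvSegsF]
      cases hx : pvFindTop 0 cs with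
      | none => rfl
      | some j =>
        have hj := pvFindTop_lt hx
        simp only
        rw [ih g (cs.drop (j + 1)) (by simp; omega) (by simp; omega)]

theorem pvSegs_none {cs : List Char} (hf : pvFindTop 0 cs = none) : pvSegs cs = [cs] := by
  simp [pvSegs, pvSegsF, hf]

theorem pvSegs_some {cs : List Char} {j : Nat} (hf : pvFindTop 0 cs = some j) :
    pvSegs cs = cs.take j :: pvSegs (cs.drop (j + 1)) := by
  have hj := pvFindTop_lt hf
  have h1 : pvSegsF (cs.length + 1) cs = cs.take j :: pvSegsF cs.length (cs.drop (j + 1)) := by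
    rw [pvSegsF, hf]
  unfold pvSegs
  rw [h1, pvSegsF_congr cs.length ((cs.drop (j + 1)).length + 1) (cs.drop (j + 1))
    (by simp; omega) (by simp)]

-- main invariant: A's finalized fold from a clean state equals cols ++ B's result
theorem pvMain (cs : List Char) : ∀ (cols : List (List Char)),
    pvAfin (cs.foldl pvAstep (cols, 0, [])) = cols ++ pvBfin (pvSegs cs) := by
  induction hn : cs.length using Nat.strong_induction_on generalizing cs with
  | _ n ih =>
    intro cols
    rw [pvA_split]
    cases hf : pvFindTop 0 cs with
    | none =>
      rw [pvSegs_none hf]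
      simp only [pvAfin, pvBfin, List.nil_append, List.getLastD]
      split <;> simp_all
    | some j =>
      have hj := pvFindTop_lt hf
      dsimp only
      rw [pvSegs_some hf,
        ih (cs.drop (j + 1)).length (by subst hn; simp; omega) _ rfl,
        pvBfin_cons _ (pvSegs_ne_nil _)]
      simp

-- ===== VERDICT (by name: the statement is the Claim_ definition above) =====
theorem parse_select_cols_py_spec : Claim_equal_parse_select_cols_py := by
  intro s _
  unfold Spec_parse_select_cols_py parse_select_cols_py parse_select_cols_py_alt
  by_cases h : s = ""
  · simp [h]
  · simp only [h, if_neg, if_false]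
    rw [pvMain]
    simp
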